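-- pv_equiv track=rewrite | github.com/valentk777/Competitive-Programming | Codeforces/Python/_Regular Rounds/Round #834 (Div. 3)/D.py | get_2_and_5_count
-- ===== SOURCE A (Python) =====
-- from collections import defaultdict, Counter
--
-- def get_2_and_5_count(n):
--     _counts = defaultdict(int)
--
--     while n % 2 == 0:
--         _counts[2] += 1
--         n //= 2
--
--     while n % 5 == 0:
--         _counts[5] += 1
--         n //= 5
--
--     return _counts
-- ===== SOURCE B (Python) =====
-- from collections import defaultdict
--
--
-- def count_factor(n, p):
--     """Divide n by p while divisible; return (quotient, multiplicity)."""
--     if n % p: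
--         return n, 0
--     q, c = count_factor(n // p, p)
--     return q, c + 1
--
--
-- def get_2_and_5_count(n):
--     _counts = defaultdict(int)
--     for p in (2, 5):
--         n, c = count_factor(n, p)
--         if c:
--             _counts[p] = c
--     return _counts
-- ===== Notes on version B (the rewrite author's own statement) =====
-- stated objective: alternative
-- what changed: Replaces the two unrolled while-loops that increment a defaultdict entry on every division step by a recursive helper count_factor(n, p) returning (quotient, multiplicity), driven by a single loop over the primes (2, 5) that stores each nonzero count with one assignment.
import Mathlib
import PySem

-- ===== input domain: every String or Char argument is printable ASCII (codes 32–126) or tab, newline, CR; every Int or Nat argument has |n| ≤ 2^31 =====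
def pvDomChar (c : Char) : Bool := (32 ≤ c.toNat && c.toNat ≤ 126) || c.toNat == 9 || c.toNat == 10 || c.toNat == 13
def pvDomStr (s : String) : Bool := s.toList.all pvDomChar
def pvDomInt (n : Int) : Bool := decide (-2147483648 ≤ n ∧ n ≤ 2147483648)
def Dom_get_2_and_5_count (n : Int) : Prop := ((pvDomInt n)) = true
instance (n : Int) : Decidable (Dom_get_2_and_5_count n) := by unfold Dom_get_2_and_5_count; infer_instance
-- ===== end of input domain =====

-- B replaces A's two unrolled while-loops (incrementing a defaultdict per division step) by a
-- recursive count_factor helper driven by a loop over the primes [2, 5], storing each nonzero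
-- count with a single assignment; same cost, different decomposition.


-- termination helper used by all three recursions below
theorem pvDecr (n p : Int) (h1 : PySem.Int.mod n p = 0) (h2 : n ≠ 0) (h3 : 2 ≤ p) :
    (PySem.Int.floordiv n p).natAbs < n.natAbs := by
  obtain ⟨k, rfl⟩ := (PySem.Int.mod_eq_zero_iff_dvd n p).1 h1
  rw [PySem.Int.floordiv_eq_ediv_of_pos (by omega), Int.mul_ediv_cancel_left _ (by omega)]
  have hk : k ≠ 0 := by rintro rfl; simp at h2
  have habs : (p * k).natAbs = p.natAbs * k.natAbs := Int.natAbs_mul p k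
  have hp : 2 ≤ p.natAbs := by omega
  have hk' : 1 ≤ k.natAbs := by omega
  calc k.natAbs < 2 * k.natAbs := by omega
    _ ≤ p.natAbs * k.natAbs := Nat.mul_le_mul_right _ hp
    _ = (p * k).natAbs := habs.symm

-- ===== PORT A =====
-- 'while n % 2 == 0: _counts[2] += 1; n //= 2'  ('n ≠ 0' is a totality guard only: Python loops forever at n = 0)
def pvLoop2 (n : Int) (d : PySem.Dict Int Int) : Int × PySem.Dict Int Int :=
  if h : PySem.Int.mod n 2 = 0 ∧ n ≠ 0 then
    pvLoop2 (PySem.Int.floordiv n 2) (d.insert 2 (d.getD 2 0 + 1))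
  else (n, d)
termination_by n.natAbs
decreasing_by exact pvDecr n 2 h.1 h.2 (by norm_num)

-- 'while n % 5 == 0: _counts[5] += 1; n //= 5'  (same totality guard)
def pvLoop5 (n : Int) (d : PySem.Dict Int Int) : Int × PySem.Dict Int Int :=
  if h : PySem.Int.mod n 5 = 0 ∧ n ≠ 0 then
    pvLoop5 (PySem.Int.floordiv n 5) (d.insert 5 (d.getD 5 0 + 1))
  else (n, d)
termination_by n.natAbs
decreasing_by exact pvDecr n 5 h.1 h.2 (by norm_num)

def get_2_and_5_count (n : Int) : List (Int × Int) :=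
  let r2 := pvLoop2 n PySem.Dict.empty
  let r5 := pvLoop5 r2.1 r2.2
  r5.2.items

-- ===== PORT B =====
-- count_factor(n, p); the 'n ≠ 0 ∧ 2 ≤ p' part of the guard is a totality guard only
-- (Python's recursion does not terminate at n = 0)
def pvCountFactor (n p : Int) : Int × Int :=
  if h : PySem.Int.mod n p = 0 ∧ n ≠ 0 ∧ 2 ≤ p then
    let r := pvCountFactor (PySem.Int.floordiv n p) p
    (r.1, r.2 + 1)
  else (n, 0)
termination_by n.natAbs
decreasing_by exact pvDecr n p h.1 h.2.1 h.2.2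

def get_2_and_5_count_alt (n : Int) : List (Int × Int) :=
  (([2, 5] : List Int).foldl
    (fun (st : Int × PySem.Dict Int Int) p =>
      let r := pvCountFactor st.1 p
      (r.1, if r.2 ≠ 0 then st.2.insert p r.2 else st.2))
    (n, PySem.Dict.empty)).2.items

-- ===== PRECONDITION & SPEC =====
def Spec_get_2_and_5_count (n : Int) (out : List (Int × Int)) : Prop := out = get_2_and_5_count_alt n
instance (n : Int) (out : List (Int × Int)) : Decidable (Spec_get_2_and_5_count n out) := by unfold Spec_get_2_and_5_count; infer_instance

-- ===== CLAIM (what is proved, stated in full; the proofs are below) =====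
def Claim_equal_get_2_and_5_count : Prop := ∀ (n : Int), Dom_get_2_and_5_count n → Spec_get_2_and_5_count n (get_2_and_5_count n)

-- ===== LEMMAS AND PROOFS =====

theorem cf_snd_nonneg_aux (k : Nat) : ∀ n p : Int, n.natAbs ≤ k → 0 ≤ (pvCountFactor n p).2 := by
  induction k with
  | zero =>
    intro n p hk
    have hn : n = 0 := by omega
    subst hn
    rw [pvCountFactor]
    simp
  | succ k ih =>
    intro n p hk
    by_cases hg : PySem.Int.mod n p = 0 ∧ n ≠ 0 ∧ 2 ≤ p
    · rw [pvCountFactor, dif_pos hg]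
      have := ih (PySem.Int.floordiv n p) p
        (by have := pvDecr n p hg.1 hg.2.1 hg.2.2; omega)
      simpa using by omega
    · rw [pvCountFactor, dif_neg hg]

theorem cf_snd_nonneg (n p : Int) : 0 ≤ (pvCountFactor n p).2 :=
  cf_snd_nonneg_aux n.natAbs n p (le_refl _)

theorem cf_unfold_pos (n p : Int) (h : PySem.Int.mod n p = 0 ∧ n ≠ 0 ∧ 2 ≤ p) :
    pvCountFactor n p =
      ((pvCountFactor (PySem.Int.floordiv n p) p).1,
       (pvCountFactor (PySem.Int.floordiv n p) p).2 + 1) := by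
  rw [pvCountFactor, dif_pos h]

theorem cf_unfold_neg (n p : Int) (h : ¬ (PySem.Int.mod n p = 0 ∧ n ≠ 0 ∧ 2 ≤ p)) :
    pvCountFactor n p = (n, 0) := by
  rw [pvCountFactor, dif_neg h]

theorem loop2_pair (k : Nat) : ∀ (n v : Int), n.natAbs ≤ k →
    pvLoop2 n (PySem.Dict.mk [(2, v)]) =
      ((pvCountFactor n 2).1, PySem.Dict.mk [(2, v + (pvCountFactor n 2).2)]) := by
  induction k with
  | zero =>
    intro n v hk
    have hn : n = 0 := by omega
    subst hn
    rw [pvLoop2, pvCountFactor]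
    simp
  | succ k ih =>
    intro n v hk
    by_cases hg : PySem.Int.mod n 2 = 0 ∧ n ≠ 0
    · rw [pvLoop2, dif_pos hg]
      have hd : (PySem.Dict.mk [((2:Int), v)]).insert 2 ((PySem.Dict.mk [((2:Int), v)]).getD 2 0 + 1)
          = PySem.Dict.mk [(2, v + 1)] := by
        simp [PySem.Dict.insert, PySem.Dict.getD, PySem.Dict.get?, PySem.Dict.contains]
      rw [hd, ih _ _ (by have := pvDecr n 2 hg.1 hg.2 (by norm_num); omega),
        cf_unfold_pos n 2 ⟨hg.1, hg.2, by norm_num⟩]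
      rw [add_assoc, add_comm 1 _]
    · rw [pvLoop2, dif_neg hg, cf_unfold_neg n 2 (fun hc => hg ⟨hc.1, hc.2.1⟩)]
      simp

theorem loop2_empty (n : Int) :
    pvLoop2 n PySem.Dict.empty =
      ((pvCountFactor n 2).1,
        if (pvCountFactor n 2).2 = 0 then (PySem.Dict.empty : PySem.Dict Int Int)
        else PySem.Dict.mk [(2, (pvCountFactor n 2).2)]) := by
  by_cases hg : PySem.Int.mod n 2 = 0 ∧ n ≠ 0
  · rw [pvLoop2, dif_pos hg, cf_unfold_pos n 2 ⟨hg.1, hg.2, by norm_num⟩]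
    refine Eq.trans (b := pvLoop2 (PySem.Int.floordiv n 2) (PySem.Dict.mk [(2, 1)])) rfl ?_
    rw [loop2_pair (PySem.Int.floordiv n 2).natAbs _ _ (le_refl _)]
    have hnn := cf_snd_nonneg (PySem.Int.floordiv n 2) 2
    rw [if_neg (by omega), add_comm 1 _]
  · rw [pvLoop2, dif_neg hg, cf_unfold_neg n 2 (fun hc => hg ⟨hc.1, hc.2.1⟩)]
    simp

theorem loop5_pair1 (k : Nat) : ∀ (n c v : Int), n.natAbs ≤ k →
    pvLoop5 n (PySem.Dict.mk [(2, c), (5, v)]) =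
      ((pvCountFactor n 5).1, PySem.Dict.mk [(2, c), (5, v + (pvCountFactor n 5).2)]) := by
  induction k with
  | zero =>
    intro n c v hk
    have hn : n = 0 := by omega
    subst hn
    rw [pvLoop5, pvCountFactor]
    simp
  | succ k ih =>
    intro n c v hk
    by_cases hg : PySem.Int.mod n 5 = 0 ∧ n ≠ 0
    · rw [pvLoop5, dif_pos hg]
      have hd : (PySem.Dict.mk [((2:Int), c), (5, v)]).insert 5
            ((PySem.Dict.mk [((2:Int), c), (5, v)]).getD 5 0 + 1)
          = PySem.Dict.mk [(2, c), (5, v + 1)] := by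
        simp [PySem.Dict.insert, PySem.Dict.getD, PySem.Dict.get?, PySem.Dict.contains]
      rw [hd, ih _ _ _ (by have := pvDecr n 5 hg.1 hg.2 (by norm_num); omega),
        cf_unfold_pos n 5 ⟨hg.1, hg.2, by norm_num⟩]
      rw [add_assoc, add_comm 1 _]
    · rw [pvLoop5, dif_neg hg, cf_unfold_neg n 5 (fun hc => hg ⟨hc.1, hc.2.1⟩)]
      simp

theorem loop5_pair0 (k : Nat) : ∀ (n v : Int), n.natAbs ≤ k →
    pvLoop5 n (PySem.Dict.mk [(5, v)]) =
      ((pvCountFactor n 5).1, PySem.Dict.mk [(5, v + (pvCountFactor n 5).2)]) := by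
  induction k with
  | zero =>
    intro n v hk
    have hn : n = 0 := by omega
    subst hn
    rw [pvLoop5, pvCountFactor]
    simp
  | succ k ih =>
    intro n v hk
    by_cases hg : PySem.Int.mod n 5 = 0 ∧ n ≠ 0
    · rw [pvLoop5, dif_pos hg]
      have hd : (PySem.Dict.mk [((5:Int), v)]).insert 5 ((PySem.Dict.mk [((5:Int), v)]).getD 5 0 + 1)
          = PySem.Dict.mk [(5, v + 1)] := by
        simp [PySem.Dict.insert, PySem.Dict.getD, PySem.Dict.get?, PySem.Dict.contains]
      rw [hd, ih _ _ (by have := pvDecr n 5 hg.1 hg.2 (by norm_num); omega),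
        cf_unfold_pos n 5 ⟨hg.1, hg.2, by norm_num⟩]
      rw [add_assoc, add_comm 1 _]
    · rw [pvLoop5, dif_neg hg, cf_unfold_neg n 5 (fun hc => hg ⟨hc.1, hc.2.1⟩)]
      simp

theorem loop5_empty (n : Int) :
    pvLoop5 n PySem.Dict.empty =
      ((pvCountFactor n 5).1,
        if (pvCountFactor n 5).2 = 0 then (PySem.Dict.empty : PySem.Dict Int Int)
        else PySem.Dict.mk [(5, (pvCountFactor n 5).2)]) := by
  by_cases hg : PySem.Int.mod n 5 = 0 ∧ n ≠ 0
  · rw [pvLoop5, dif_pos hg, cf_unfold_pos n 5 ⟨hg.1, hg.2, by norm_num⟩]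
    refine Eq.trans (b := pvLoop5 (PySem.Int.floordiv n 5) (PySem.Dict.mk [(5, 1)])) rfl ?_
    rw [loop5_pair0 (PySem.Int.floordiv n 5).natAbs _ _ (le_refl _)]
    have hnn := cf_snd_nonneg (PySem.Int.floordiv n 5) 5
    rw [if_neg (by omega), add_comm 1 _]
  · rw [pvLoop5, dif_neg hg, cf_unfold_neg n 5 (fun hc => hg ⟨hc.1, hc.2.1⟩)]
    simp

theorem loop5_two (n c : Int) :
    pvLoop5 n (PySem.Dict.mk [(2, c)]) =
      ((pvCountFactor n 5).1,
        if (pvCountFactor n 5).2 = 0 then PySem.Dict.mk [((2:Int), c)]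
        else PySem.Dict.mk [(2, c), (5, (pvCountFactor n 5).2)]) := by
  by_cases hg : PySem.Int.mod n 5 = 0 ∧ n ≠ 0
  · rw [pvLoop5, dif_pos hg, cf_unfold_pos n 5 ⟨hg.1, hg.2, by norm_num⟩]
    have hd : (PySem.Dict.mk [((2:Int), c)]).insert 5 ((PySem.Dict.mk [((2:Int), c)]).getD 5 0 + 1)
        = PySem.Dict.mk [(2, c), (5, 1)] := by
      simp [PySem.Dict.insert, PySem.Dict.getD, PySem.Dict.get?, PySem.Dict.contains]
    rw [hd, loop5_pair1 (PySem.Int.floordiv n 5).natAbs _ _ _ (le_refl _)]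
    have hnn := cf_snd_nonneg (PySem.Int.floordiv n 5) 5
    rw [if_neg (by omega), add_comm 1 _]
  · rw [pvLoop5, dif_neg hg, cf_unfold_neg n 5 (fun hc => hg ⟨hc.1, hc.2.1⟩)]
    simp

-- ===== VERDICT (by name: the statement is the Claim_ definition above) =====
theorem get_2_and_5_count_spec : Claim_equal_get_2_and_5_count := by
  intro n _
  unfold Spec_get_2_and_5_count get_2_and_5_count get_2_and_5_count_alt
  simp only [List.foldl, loop2_empty]
  by_cases h2 : (pvCountFactor n 2).2 = 0
  · rw [if_pos h2]
    simp only [loop5_empty]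
    by_cases h5 : (pvCountFactor (pvCountFactor n 2).1 5).2 = 0
    · simp [h2, h5, PySem.Dict.empty]
    · simp [h2, h5, PySem.Dict.insert, PySem.Dict.contains, PySem.Dict.empty]
  · rw [if_neg h2]
    simp only [loop5_two]
    by_cases h5 : (pvCountFactor (pvCountFactor n 2).1 5).2 = 0
    · simp [h2, h5, PySem.Dict.insert, PySem.Dict.contains, PySem.Dict.empty]
    · simp [h2, h5, PySem.Dict.insert, PySem.Dict.contains, PySem.Dict.empty]
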